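-- pv_equiv track=rewrite | github.com/thp/dos-game-jam-demo-disc | catalog/scanfile.py | check_filename
-- ===== SOURCE A (Python) =====
-- import string
--
-- def valid_char(ch):
--     return ch in (string.digits + string.ascii_lowercase + '_')
--
-- BLOCKLISTED_FILENAMES = ('cwsdpmi.swp',)
--
-- def check_filename(basename):
--     basename = basename.lower()
--
--     if basename in BLOCKLISTED_FILENAMES:
--         # Temporary/swap/... file
--         return False
--
--     if '.' in basename:
--         base, ext = basename.split('.', 1)
--         if '.' in ext:
--             # Multiple dots in filename
--             return False
--     else:
--         base, ext = basename, ''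
--
--     if len(base) > 8:
--         # Basename longer than 8 characters
--         return False
--
--     if len(ext) > 3:
--         # Extension longer than 3 characters
--         return False
--
--     if not all(valid_char(ch) for ch in (base + ext)):
--         # Invalid characters
--         return False
--
--     return True
-- ===== SOURCE B (Python) =====
-- # Single-pass state machine: instead of split('.',1) + length/char-class passes,
-- # walk the name once tracking whether the dot was seen and the two lengths.
-- BLOCKLISTED_FILENAMES = ('cwsdpmi.swp',)
--
-- _VALID = set('0123456789abcdefghijklmnopqrstuvwxyz_')
--
--
-- def check_filename(basename):
--     name = basename.lower()
--     if name in BLOCKLISTED_FILENAMES: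
--         return False
--     seen_dot = False
--     base_len = 0
--     ext_len = 0
--     for ch in name:
--         if ch == '.':
--             if seen_dot:
--                 return False
--             seen_dot = True
--         elif ch in _VALID:
--             if seen_dot:
--                 ext_len += 1
--             else:
--                 base_len += 1
--         else:
--             return False
--     return base_len <= 8 and ext_len <= 3
-- ===== Notes on version B (the rewrite author's own statement) =====
-- stated objective: alternative
-- what changed: Replaced the split('.',1)/length-check/all(valid_char) pipeline by a single left-to-right state machine that tracks whether the dot was seen and the base/extension lengths, rejecting on a second dot or an invalid character as it scans.
import Mathlib
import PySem

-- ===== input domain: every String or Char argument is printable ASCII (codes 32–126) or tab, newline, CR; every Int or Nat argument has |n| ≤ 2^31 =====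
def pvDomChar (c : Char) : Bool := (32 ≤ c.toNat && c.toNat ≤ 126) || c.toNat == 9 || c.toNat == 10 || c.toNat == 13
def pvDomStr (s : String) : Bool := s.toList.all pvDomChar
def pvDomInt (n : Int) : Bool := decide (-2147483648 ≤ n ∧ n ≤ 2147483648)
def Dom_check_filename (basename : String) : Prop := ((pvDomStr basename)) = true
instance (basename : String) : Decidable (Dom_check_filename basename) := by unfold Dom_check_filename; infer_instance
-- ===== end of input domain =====

-- B replaces A's split('.',1)/length/char-class pipeline by a single-pass state machine; alternative decomposition, same cost.

-- ===== PORT A =====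
-- valid_char(ch): ch in (string.digits + string.ascii_lowercase + '_')  ('in' on a str with a 1-char needle = char membership)
def pv_valid_char (ch : Char) : Bool := "0123456789abcdefghijklmnopqrstuvwxyz_".toList.contains ch

def check_filename (basename : String) : Bool :=
  let name := PySem.Str.lower basename
  if ["cwsdpmi.swp"].contains name then false   -- basename in BLOCKLISTED_FILENAMES
  else
    let be : String × String :=
      if PySem.Str.isIn "." name then
        match PySem.Str.splitMax? name "." 1 with
        | some (b :: e :: _) => (b, e)
        | _ => ("", "")   -- unreachable: '.' in name ⇒ split('.', 1) yields exactly two pieces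
      else (name, "")
    if PySem.Str.isIn "." be.2 then false       -- multiple dots
    else if 8 < PySem.Str.len be.1 then false   -- len(base) > 8
    else if 3 < PySem.Str.len be.2 then false   -- len(ext) > 3
    else if !((be.1.toList ++ be.2.toList).all pv_valid_char) then false  -- not all(valid_char(ch) for ch in base + ext)
    else true

-- ===== PORT B =====
def pv_VALID : PySem.Set Char := PySem.Set.ofList "0123456789abcdefghijklmnopqrstuvwxyz_".toList

-- the for-loop of Source B: state (seen_dot, base_len, ext_len); early return False on 2nd dot / bad char
def pvAltLoop : List Char → Bool → Nat → Nat → Bool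
  | [], _, b, e => decide (b ≤ 8) && decide (e ≤ 3)
  | c :: rest, seen, b, e =>
    if c = '.' then
      if seen then false else pvAltLoop rest true b e
    else if PySem.Set.contains pv_VALID c then
      if seen then pvAltLoop rest seen b (e + 1) else pvAltLoop rest seen (b + 1) e
    else false

def check_filename_alt (basename : String) : Bool :=
  let name := PySem.Str.lower basename
  if ["cwsdpmi.swp"].contains name then false   -- name in BLOCKLISTED_FILENAMES
  else pvAltLoop name.toList false 0 0

-- ===== PRECONDITION & SPEC =====
def Spec_check_filename (basename : String) (out : Bool) : Prop := out = check_filename_alt basename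
instance (basename : String) (out : Bool) : Decidable (Spec_check_filename basename out) := by unfold Spec_check_filename; infer_instance

-- ===== CLAIM (what is proved, stated in full; the proofs are below) =====
def Claim_equal_check_filename : Prop := ∀ (basename : String), Dom_check_filename basename → Spec_check_filename basename (check_filename basename)

-- ===== LEMMAS AND PROOFS =====

-- the tail of A after the blocklist guard, as a function of (base, ext)
def pvABody (be : String × String) : Bool :=
  if PySem.Str.isIn "." be.2 then false
  else if 8 < PySem.Str.len be.1 then false
  else if 3 < PySem.Str.len be.2 then false
  else if !((be.1.toList ++ be.2.toList).all pv_valid_char) then false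
  else true

lemma mem_pv_VALID (c : Char) : c ∈ pv_VALID ↔ pv_valid_char c = true := by
  simp [pv_VALID, pv_valid_char, PySem.Set.mem_ofList, List.contains_eq_mem]

lemma valid_set_eq (c : Char) : PySem.Set.contains pv_VALID c = pv_valid_char c := by
  rw [Bool.eq_iff_iff, PySem.Set.contains_iff]
  exact mem_pv_VALID c

lemma alt_cons_dot_false (rest : List Char) (b e : Nat) :
    pvAltLoop ('.' :: rest) false b e = pvAltLoop rest true b e := by
  simp [pvAltLoop]

lemma alt_cons_dot_true (rest : List Char) (b e : Nat) :
    pvAltLoop ('.' :: rest) true b e = false := by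
  simp [pvAltLoop]

lemma alt_cons_valid (c : Char) (rest : List Char) (seen : Bool) (b e : Nat)
    (hc : c ≠ '.') (hv : pv_valid_char c = true) :
    pvAltLoop (c :: rest) seen b e =
      if seen then pvAltLoop rest seen b (e + 1) else pvAltLoop rest seen (b + 1) e := by
  rw [pvAltLoop, if_neg hc, valid_set_eq, hv, if_pos rfl]

lemma alt_cons_invalid (c : Char) (rest : List Char) (seen : Bool) (b e : Nat)
    (hc : c ≠ '.') (hv : pv_valid_char c = false) :
    pvAltLoop (c :: rest) seen b e = false := by
  rw [pvAltLoop, if_neg hc, valid_set_eq, hv]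
  simp

lemma chars_isIn_dot (l : List Char) : PySem.Chars.isIn ['.'] l = l.contains '.' := by
  by_cases h : '.' ∈ l
  · obtain ⟨s, t, rfl⟩ := List.append_of_mem h
    have hinf : ['.'] <:+: s ++ '.' :: t := ⟨s, t, by simp⟩
    simp [h, (PySem.Chars.isIn_iff_infix _ _).mpr hinf, List.contains_eq_mem]
  · have hninf : ¬ ['.'] <:+: l := fun hinf => h (hinf.subset (by simp))
    have hfalse : PySem.Chars.isIn ['.'] l ≠ true := fun hc => hninf ((PySem.Chars.isIn_iff_infix _ _).mp hc)
    simp only [Bool.not_eq_true] at hfalse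
    rw [hfalse, List.contains_eq_mem]
    simp [h]

lemma str_isIn_dot (s : String) : PySem.Str.isIn "." s = s.toList.contains '.' := by
  have : PySem.Str.isIn "." s = PySem.Chars.isIn ['.'] s.toList := rfl
  rw [this, chars_isIn_dot]

lemma go_zero (fuel : Nat) (l cur : List Char) (acc : List (List Char)) :
    PySem.Chars.splitOnMax.go ['.'] fuel 0 l cur acc = acc.reverse ++ [cur.reverse ++ l] := by
  cases fuel with
  | zero => cases l <;> simp [PySem.Chars.splitOnMax.go]
  | succ n => cases l <;> simp [PySem.Chars.splitOnMax.go]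

lemma go_one (fuel : Nat) : ∀ (l cur : List Char) (acc : List (List Char)), l.length < fuel →
    PySem.Chars.splitOnMax.go ['.'] fuel 1 l cur acc =
      if '.' ∈ l then
        acc.reverse ++ [cur.reverse ++ l.takeWhile (· ≠ '.'), (l.dropWhile (· ≠ '.')).tail]
      else acc.reverse ++ [cur.reverse ++ l] := by
  induction fuel with
  | zero => intro l cur acc h; omega
  | succ fuel ih =>
    intro l cur acc h
    cases l with
    | nil => simp [PySem.Chars.splitOnMax.go]
    | cons c rest =>
      by_cases hc : c = '.'
      · subst hc
        simp [PySem.Chars.splitOnMax.go, List.isPrefixOf, go_zero]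
      · have hpre : ¬ (['.'].isPrefixOf (c :: rest) = true) := by
          simp [List.isPrefixOf]; exact fun hh => hc hh.symm
        have hlen : rest.length < fuel := by simpa using Nat.lt_of_succ_lt_succ h
        simp only [PySem.Chars.splitOnMax.go]
        rw [if_neg (by omega), if_neg hpre, ih rest (c :: cur) acc hlen]
        by_cases hm : '.' ∈ rest
        · simp [hm, hc, Ne.symm hc]
        · simp [hm, hc, Ne.symm hc]

lemma split_dot (s : String) (h : '.' ∈ s.toList) :
    PySem.Str.splitMax? s "." 1 =
      some [String.ofList (s.toList.takeWhile (· ≠ '.')),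
            String.ofList ((s.toList.dropWhile (· ≠ '.')).tail)] := by
  have hgo := go_one (s.toList.length + 1) s.toList [] [] (by omega)
  rw [if_pos h] at hgo
  have h1 : PySem.Str.splitMax? s "." 1 =
      Option.map (fun x => List.map String.ofList x) (PySem.Chars.splitMax? s.toList ['.'] 1) := rfl
  have h2 : PySem.Chars.splitMax? s.toList ['.'] 1 =
      some (PySem.Chars.splitOnMax.go ['.'] (s.toList.length + 1) 1 s.toList [] []) := by
    rw [PySem.Chars.splitMax?, PySem.Chars.splitOnMax]
    simp
  rw [h1, h2, hgo]
  simp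

lemma alt_true (cs : List Char) : ∀ (b e : Nat),
    pvAltLoop cs true b e =
      (!cs.contains '.' && cs.all pv_valid_char && decide (b ≤ 8 ∧ e + cs.length ≤ 3)) := by
  induction cs with
  | nil => intro b e; simp [pvAltLoop, Bool.decide_and, List.contains_eq_mem]
  | cons c rest ih =>
    intro b e
    by_cases hc : c = '.'
    · subst hc
      rw [alt_cons_dot_true]
      simp [List.contains_eq_mem]
    · by_cases hv : pv_valid_char c = true
      · rw [alt_cons_valid c rest true b e hc hv, if_pos rfl, ih b (e + 1)]
        have hd : decide (b ≤ 8 ∧ e + 1 + rest.length ≤ 3) = decide (b ≤ 8 ∧ e + (c :: rest).length ≤ 3) := by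
          rw [decide_eq_decide]; constructor <;> (intro ⟨h1, h2⟩; exact ⟨h1, by simp at *; omega⟩)
        rw [hd]
        simp [List.contains_eq_mem, hc, Ne.symm hc, hv]
      · rw [Bool.not_eq_true] at hv
        rw [alt_cons_invalid c rest true b e hc hv]
        simp [hv]

lemma alt_prefix (pre : List Char) : ∀ (rest : List Char) (b e : Nat), '.' ∉ pre →
    pvAltLoop (pre ++ rest) false b e =
      if pre.all pv_valid_char then pvAltLoop rest false (b + pre.length) e else false := by
  induction pre with
  | nil => intro rest b e _; simp
  | cons c pre' ih =>
    intro rest b e hnd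
    have hc : c ≠ '.' := fun hh => hnd (by simp [hh])
    have hnd' : '.' ∉ pre' := fun hh => hnd (by simp [hh])
    by_cases hv : pv_valid_char c = true
    · rw [List.cons_append, alt_cons_valid c (pre' ++ rest) false b e hc hv, if_neg (by simp),
          ih rest (b + 1) e hnd']
      have : b + 1 + pre'.length = b + (c :: pre').length := by simp; omega
      simp [List.all_cons, hv, this]
    · rw [Bool.not_eq_true] at hv
      rw [List.cons_append, alt_cons_invalid c (pre' ++ rest) false b e hc hv]
      simp [List.all_cons, hv]

lemma alt_nodot (cs : List Char) (b e : Nat) (h : '.' ∉ cs) :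
    pvAltLoop cs false b e = (cs.all pv_valid_char && decide (b + cs.length ≤ 8 ∧ e ≤ 3)) := by
  have hp := alt_prefix cs [] b e h
  rw [List.append_nil] at hp
  rw [hp]
  by_cases ha : cs.all pv_valid_char = true <;> simp [ha, pvAltLoop, Bool.decide_and]

lemma dot_decomp (cs : List Char) (h : '.' ∈ cs) :
    cs = cs.takeWhile (· ≠ '.') ++ '.' :: (cs.dropWhile (· ≠ '.')).tail := by
  induction cs with
  | nil => cases h
  | cons c rest ih =>
    by_cases hc : c = '.'
    · subst hc
      simp [List.takeWhile_cons, List.dropWhile_cons]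
    · have hr : '.' ∈ rest := by
        cases List.mem_cons.mp h with
        | inl hh => exact absurd hh.symm hc
        | inr hh => exact hh
      simp only [List.takeWhile_cons, List.dropWhile_cons]
      rw [if_pos (by simp [hc]), if_pos (by simp [hc]), List.cons_append]
      exact congrArg (c :: ·) (ih hr)

lemma abody_dot (pre post : List Char) (hnd : '.' ∉ pre) :
    pvABody (String.ofList pre, String.ofList post) = pvAltLoop (pre ++ '.' :: post) false 0 0 := by
  rw [alt_prefix pre ('.' :: post) 0 0 hnd, alt_cons_dot_false, alt_true post (0 + pre.length) 0]
  rw [pvABody]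
  simp only [str_isIn_dot, String.toList_ofList, PySem.Str.len, Nat.zero_add,
             List.contains_eq_mem, List.all_append]
  rw [Bool.eq_iff_iff]
  split_ifs <;> simp_all [List.all_eq_true, decide_eq_true_eq] <;> omega

lemma abody_nodot (name : String) (h : '.' ∉ name.toList) :
    pvABody (name, "") = pvAltLoop name.toList false 0 0 := by
  rw [alt_nodot name.toList 0 0 h, pvABody]
  simp only [str_isIn_dot, PySem.Str.len, List.contains_eq_mem, List.all_append,
             show ("" : String).toList = [] from rfl, List.append_nil]
  rw [Bool.eq_iff_iff]
  split_ifs <;> simp_all [List.all_eq_true, decide_eq_true_eq] <;> omega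

lemma match_two (p1 p2 : String) (t : List String) :
    (match (some (p1 :: p2 :: t) : Option (List String)) with
     | some (b :: e :: _) => (b, e)
     | _ => (("" : String), ("" : String))) = (p1, p2) := rfl

-- ===== VERDICT (by name: the statement is the Claim_ definition above) =====
theorem check_filename_spec : Claim_equal_check_filename := by
  intro basename _
  show check_filename basename = check_filename_alt basename
  have hA : check_filename basename =
      (if ["cwsdpmi.swp"].contains (PySem.Str.lower basename) then false
       else pvABody (if PySem.Str.isIn "." (PySem.Str.lower basename) then
              match PySem.Str.splitMax? (PySem.Str.lower basename) "." 1 with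
              | some (b :: e :: _) => (b, e)
              | _ => ("", "")
            else (PySem.Str.lower basename, ""))) := rfl
  have hB : check_filename_alt basename =
      (if ["cwsdpmi.swp"].contains (PySem.Str.lower basename) then false
       else pvAltLoop (PySem.Str.lower basename).toList false 0 0) := rfl
  rw [hA, hB]
  generalize PySem.Str.lower basename = name
  by_cases hb : (["cwsdpmi.swp"].contains name) = true
  · rw [if_pos hb, if_pos hb]
  · rw [if_neg hb, if_neg hb]
    by_cases hdot : '.' ∈ name.toList
    · have hpos : name.toList.contains '.' = true := by
        rw [List.contains_eq_mem]; exact decide_eq_true hdot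
      rw [str_isIn_dot, if_pos hpos, split_dot name hdot, match_two _ _ []]
      have hnd : '.' ∉ name.toList.takeWhile (· ≠ '.') := by
        intro hh
        have := List.mem_takeWhile_imp hh
        simp at this
      rw [abody_dot _ _ hnd]
      conv_rhs => rw [dot_decomp name.toList hdot]
    · have hneg : name.toList.contains '.' = false := by
        rw [List.contains_eq_mem]; exact decide_eq_false hdot
      rw [str_isIn_dot, if_neg (by rw [hneg]; simp)]
      exact abody_nodot name hdot
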